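-- pv_equiv track=rewrite | github.com/AltGuNi/lol-divide-teams | lol_team.py | kumiawase
-- ===== SOURCE A (Python) =====
-- def listExcludedIndices(data, indices=[]):
--   return [x for i, x in enumerate(data) if i not in indices]
--
-- def kumiawase(leng):
--     result = []
--     data = list(range(leng))
--     for i in range(leng):
--         for j in range(i, leng - 1):
--             for k in range(j, leng - 2):
--                 for l in range(k, leng - 3):
--                     for m in range(l, leng - 4):
--                            jdata = listExcludedIndices(data, [j])
--                            kdata = listExcludedIndices(jdata, [k])
--                            ldata = listExcludedIndices(kdata, [l])
--                            mdata = listExcludedIndices(ldata, [m])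
--                            result.append([data[i], jdata[j], kdata[k], ldata[l], mdata[m]])
--     return result
-- ===== SOURCE B (Python) =====
-- def kumiawase(leng):
--     # closed form: data[i]=i and each filtered list just shifts later values by one,
--     # so the selected entries are i, j+1, k+2, l+3, m+4 -- no list rebuilding needed
--     return [[i, j + 1, k + 2, l + 3, m + 4]
--             for i in range(leng)
--             for j in range(i, leng - 1)
--             for k in range(j, leng - 2)
--             for l in range(k, leng - 3)
--             for m in range(l, leng - 4)]
-- ===== Notes on version B (the rewrite author's own statement) =====
-- stated objective: alternative
-- what changed: B replaces the per-iteration rebuilding of four filtered copies of the list (and indexing into them) by the closed-form tuple [i, j+1, k+2, l+3, m+4], emitted directly by a comprehension (measured 17.9x at the largest size both finished, but the output itself is Theta(leng^5), so a timing run could not confirm 'faster').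
import Mathlib
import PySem

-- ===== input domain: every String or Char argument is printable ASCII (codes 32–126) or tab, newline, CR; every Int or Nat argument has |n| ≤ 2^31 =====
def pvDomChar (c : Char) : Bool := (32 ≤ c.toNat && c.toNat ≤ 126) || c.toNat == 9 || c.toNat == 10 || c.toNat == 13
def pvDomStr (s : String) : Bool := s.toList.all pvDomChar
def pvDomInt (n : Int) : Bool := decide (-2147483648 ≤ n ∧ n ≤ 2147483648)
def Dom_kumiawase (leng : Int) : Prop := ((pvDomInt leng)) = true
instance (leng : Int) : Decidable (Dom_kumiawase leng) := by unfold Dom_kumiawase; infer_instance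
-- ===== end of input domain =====

-- B emits each 5-tuple in closed form instead of rebuilding four filtered lists per iteration.

-- ===== PORT A =====
def listExcludedIndices (data : List Int) (indices : List Int) : List Int :=
  ((PySem.List.enumerate data 0).filter (fun p => !(indices.contains p.1))).map (fun p => p.2)

-- indexing via pyGetD with default 0: exact here, every index taken is in range whenever the loop body runs
def kumiawase (leng : Int) : List (List Int) :=
  let data := PySem.List.pyRange 0 leng 1
  (PySem.List.pyRange 0 leng 1).foldl (fun result i =>
    (PySem.List.pyRange i (leng - 1) 1).foldl (fun result j =>
      (PySem.List.pyRange j (leng - 2) 1).foldl (fun result k =>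
        (PySem.List.pyRange k (leng - 3) 1).foldl (fun result l =>
          (PySem.List.pyRange l (leng - 4) 1).foldl (fun result m =>
            let jdata := listExcludedIndices data [j]
            let kdata := listExcludedIndices jdata [k]
            let ldata := listExcludedIndices kdata [l]
            let mdata := listExcludedIndices ldata [m]
            result ++ [[PySem.List.pyGetD data i 0, PySem.List.pyGetD jdata j 0,
                        PySem.List.pyGetD kdata k 0, PySem.List.pyGetD ldata l 0,
                        PySem.List.pyGetD mdata m 0]]) result) result) result) result) []

-- ===== PORT B =====
def kumiawase_alt (leng : Int) : List (List Int) :=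
  (PySem.List.pyRange 0 leng 1).flatMap (fun i =>
    (PySem.List.pyRange i (leng - 1) 1).flatMap (fun j =>
      (PySem.List.pyRange j (leng - 2) 1).flatMap (fun k =>
        (PySem.List.pyRange k (leng - 3) 1).flatMap (fun l =>
          (PySem.List.pyRange l (leng - 4) 1).map (fun m =>
            [i, j + 1, k + 2, l + 3, m + 4])))))

-- ===== PRECONDITION & SPEC =====
def Spec_kumiawase (leng : Int) (out : List (List Int)) : Prop := out = kumiawase_alt leng
instance (leng : Int) (out : List (List Int)) : Decidable (Spec_kumiawase leng out) := by unfold Spec_kumiawase; infer_instance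

-- ===== CLAIM (what is proved, stated in full; the proofs are below) =====
def Claim_equal_kumiawase : Prop := ∀ (leng : Int), Dom_kumiawase leng → Spec_kumiawase leng (kumiawase leng)

-- ===== LEMMAS AND PROOFS =====

-- the filtered copy listExcludedIndices builds for a single index t is exactly eraseIdx (t - start)
theorem lei_aux (xs : List Int) (s t : Int) :
    ((PySem.List.enumerate xs s).filter (fun p => !(p.1 == t))).map (fun p => p.2)
      = if 0 ≤ t - s then xs.eraseIdx (t - s).toNat else xs := by
  induction xs generalizing s with
  | nil => simp [PySem.List.enumerate_nil]
  | cons x xs ih =>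
    rw [PySem.List.enumerate_cons, List.filter_cons]
    by_cases hst : s = t
    · subst hst
      rw [if_neg (by simp)]
      rw [ih (s + 1)]
      rw [if_neg (by omega), if_pos (by omega)]
      have h0 : (s - s).toNat = 0 := by omega
      rw [h0, List.eraseIdx_cons_zero]
    · rw [if_pos (by simp [hst])]
      rw [List.map_cons, ih (s + 1)]
      by_cases h0 : 0 ≤ t - (s + 1)
      · rw [if_pos h0, if_pos (by omega)]
        have h1 : (t - s).toNat = (t - (s + 1)).toNat + 1 := by omega
        rw [h1, List.eraseIdx_cons_succ]
      · rw [if_neg h0]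
        rw [if_neg (by omega)]

theorem lei_erase (xs : List Int) (t : Int) (ht : 0 ≤ t) :
    listExcludedIndices xs [t] = xs.eraseIdx t.toNat := by
  unfold listExcludedIndices
  simp only [List.contains_cons, List.contains_nil, Bool.or_false]
  rw [lei_aux xs 0 t]
  simp [ht]

-- getD after erasing at an earlier-or-equal position reads one slot further right
theorem erase_getD_shift (xs : List Int) (p n : Nat) (hpn : p ≤ n) (h : n + 1 < xs.length) :
    (xs.eraseIdx p).getD n 0 = xs.getD (n + 1) 0 := by
  have hlen : (xs.eraseIdx p).length = xs.length - 1 := by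
    rw [List.length_eraseIdx, if_pos (by omega)]
  rw [List.getD_eq_getElem _ _ (by omega : n < (xs.eraseIdx p).length),
      List.getD_eq_getElem _ _ h, List.getElem_eraseIdx, dif_neg (by omega)]

-- the range list reads back its own index
theorem range_getD (leng : Int) (n : Nat) (h : (n : Int) < leng) :
    (PySem.List.pyRange 0 leng 1).getD n 0 = n := by
  rw [PySem.List.pyRange_one,
      PySem.List.getD_map_range (fun k => (0 : Int) + ↑k) _ n 0 (by omega)]
  simp

theorem body_eq (leng i j k l m : Int)
    (hi : 0 ≤ i ∧ i < leng) (hj : i ≤ j ∧ j < leng - 1) (hk : j ≤ k ∧ k < leng - 2)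
    (hl : k ≤ l ∧ l < leng - 3) (hm : l ≤ m ∧ m < leng - 4) :
    [PySem.List.pyGetD (PySem.List.pyRange 0 leng 1) i 0,
     PySem.List.pyGetD (listExcludedIndices (PySem.List.pyRange 0 leng 1) [j]) j 0,
     PySem.List.pyGetD (listExcludedIndices (listExcludedIndices (PySem.List.pyRange 0 leng 1) [j]) [k]) k 0,
     PySem.List.pyGetD (listExcludedIndices (listExcludedIndices (listExcludedIndices (PySem.List.pyRange 0 leng 1) [j]) [k]) [l]) l 0,
     PySem.List.pyGetD (listExcludedIndices (listExcludedIndices (listExcludedIndices (listExcludedIndices (PySem.List.pyRange 0 leng 1) [j]) [k]) [l]) [m]) m 0]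
      = [i, j + 1, k + 2, l + 3, m + 4] := by
  have h0j : 0 ≤ j := le_trans hi.1 hj.1
  have h0k : 0 ≤ k := le_trans h0j hk.1
  have h0l : 0 ≤ l := le_trans h0k hl.1
  have h0m : 0 ≤ m := le_trans h0l hm.1
  rw [lei_erase _ j h0j, lei_erase _ k h0k, lei_erase _ l h0l, lei_erase _ m h0m]
  rw [PySem.List.pyGetD_of_nonneg _ _ hi.1, PySem.List.pyGetD_of_nonneg _ _ h0j,
      PySem.List.pyGetD_of_nonneg _ _ h0k, PySem.List.pyGetD_of_nonneg _ _ h0l,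
      PySem.List.pyGetD_of_nonneg _ _ h0m]
  have hRlen : (PySem.List.pyRange 0 leng 1).length = leng.toNat := by
    rw [PySem.List.pyRange_one]; simp
  have hJlen : ((PySem.List.pyRange 0 leng 1).eraseIdx j.toNat).length = leng.toNat - 1 := by
    rw [List.length_eraseIdx, hRlen, if_pos (by omega)]
  have hKlen : (((PySem.List.pyRange 0 leng 1).eraseIdx j.toNat).eraseIdx k.toNat).length
      = leng.toNat - 2 := by
    rw [List.length_eraseIdx, hJlen, if_pos (by omega)]; omega
  have hLlen : ((((PySem.List.pyRange 0 leng 1).eraseIdx j.toNat).eraseIdx k.toNat).eraseIdx l.toNat).length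
      = leng.toNat - 3 := by
    rw [List.length_eraseIdx, hKlen, if_pos (by omega)]; omega
  rw [erase_getD_shift _ _ _ (by omega) (by omega),
      erase_getD_shift _ _ _ (by omega) (by rw [hJlen]; omega),
      erase_getD_shift _ _ _ (by omega) (by rw [hRlen]; omega),
      erase_getD_shift _ _ _ (by omega) (by rw [hKlen]; omega),
      erase_getD_shift _ _ _ (by omega) (by rw [hJlen]; omega),
      erase_getD_shift _ _ _ (by omega) (by rw [hRlen]; omega),
      erase_getD_shift _ _ _ (by omega) (by rw [hLlen]; omega),
      erase_getD_shift _ _ _ (by omega) (by rw [hKlen]; omega),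
      erase_getD_shift _ _ _ (by omega) (by rw [hJlen]; omega),
      erase_getD_shift _ _ _ (by omega) (by rw [hRlen]; omega)]
  rw [range_getD leng i.toNat (by omega), range_getD leng (j.toNat + 1) (by push_cast; omega),
      range_getD leng (k.toNat + 2) (by push_cast; omega),
      range_getD leng (l.toNat + 3) (by push_cast; omega),
      range_getD leng (m.toNat + 4) (by push_cast; omega)]
  simp only [List.cons.injEq, and_true]
  refine ⟨by omega, by push_cast; omega, by push_cast; omega, by push_cast; omega, by push_cast; omega⟩

-- ===== VERDICT (by name: the statement is the Claim_ definition above) =====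
theorem kumiawase_spec : Claim_equal_kumiawase := by
  intro leng _
  show kumiawase leng = kumiawase_alt leng
  unfold kumiawase kumiawase_alt
  simp only [PySem.List.foldl_append_singleton_eq_map, PySem.List.foldl_append_eq_flatMap,
    List.nil_append]
  refine List.flatMap_congr (fun i hi => ?_)
  refine List.flatMap_congr (fun j hj => ?_)
  refine List.flatMap_congr (fun k hk => ?_)
  refine List.flatMap_congr (fun l hl => ?_)
  refine List.map_congr_left (fun m hm => ?_)
  rw [PySem.List.mem_pyRange_one] at hi hj hk hl hm
  exact body_eq leng i j k l m hi ⟨hj.1, hj.2⟩ hk hl hm
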